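-- pv_equiv track=rewrite | github.com/JBLarson/gecko | movingAvgs.py | listMinFunc
-- ===== SOURCE A (Python) =====
-- def listMinFunc(targetDict):
-- 	firstKey = (list(targetDict.keys()))[0]
-- 	minItem = {firstKey: targetDict[firstKey]}
-- 	targetKeys = targetDict.keys()
-- 	for targetKey in targetKeys:
-- 		minDate = list(minItem.keys())[0]
-- 		if targetDict[targetKey] < minItem[minDate]:
-- 			minItem = {targetKey: targetDict[targetKey]}
-- 	return minItem
-- ===== SOURCE B (Python) =====
-- def listMinFunc(targetDict):
-- 	items = sorted(targetDict.items(), key=lambda kv: kv[1])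
-- 	k, v = items[0]
-- 	return {k: v}
-- ===== Notes on version B (the rewrite author's own statement) =====
-- stated objective: simpler
-- what changed: Replaces A's explicit min-scan loop (with its repeated dict re-lookups and singleton-dict state) by a stable sort of the items by value followed by selecting the first item.
import Mathlib
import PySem

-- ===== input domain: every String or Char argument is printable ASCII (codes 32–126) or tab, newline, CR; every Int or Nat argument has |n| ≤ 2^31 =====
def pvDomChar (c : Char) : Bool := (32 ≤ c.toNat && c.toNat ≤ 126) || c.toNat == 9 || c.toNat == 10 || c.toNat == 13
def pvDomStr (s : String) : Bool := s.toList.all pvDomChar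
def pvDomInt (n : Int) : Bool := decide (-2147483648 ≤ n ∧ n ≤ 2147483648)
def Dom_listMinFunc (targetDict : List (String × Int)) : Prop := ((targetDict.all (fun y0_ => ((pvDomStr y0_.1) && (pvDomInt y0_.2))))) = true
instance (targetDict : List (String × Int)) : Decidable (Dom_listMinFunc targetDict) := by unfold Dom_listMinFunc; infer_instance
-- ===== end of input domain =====

-- B replaces A's explicit min-scan loop by a stable sort of the items by value then taking the first item (same cost class for small dicts; a genuinely different strategy, not claimed faster).


-- ===== PORT A =====
-- targetDict[k] (dict lookup, k always present here): first match in the association list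
def pvLookup (targetDict : List (String × Int)) (k : String) : Int :=
  (List.lookup k targetDict).getD 0

-- one iteration of A's loop body (minDate = the single key of minItem, mv = minItem[minDate])
def pvStep (targetDict : List (String × Int)) (minItem : List (String × Int)) (targetKey : String) : List (String × Int) :=
  match minItem with
  | [] => minItem
  | (_, mv) :: _ =>
    if pvLookup targetDict targetKey < mv then
      [(targetKey, pvLookup targetDict targetKey)]
    else minItem

def listMinFunc (targetDict : List (String × Int)) : List (String × Int) :=
  -- firstKey = (list(targetDict.keys()))[0]  — IndexError on an empty dict (excluded by Pre_)
  match PySem.List.pyGet? (targetDict.map Prod.fst) 0 with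
  | none => []
  | some firstKey =>
    let minItem : List (String × Int) := [(firstKey, pvLookup targetDict firstKey)]
    (targetDict.map Prod.fst).foldl (pvStep targetDict) minItem

-- ===== PORT B =====
def listMinFunc_alt (targetDict : List (String × Int)) : List (String × Int) :=
  -- items = sorted(targetDict.items(), key=lambda kv: kv[1]); k, v = items[0] (IndexError on empty, excluded by Pre_); return {k: v}
  match PySem.List.sorted targetDict (fun kv => kv.2) false with
  | [] => []
  | kv :: _ => [kv]

-- ===== PRECONDITION & SPEC =====
-- A raises IndexError on the empty dict; and the association list encodes a Python dict, whose keys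
-- are necessarily distinct, so lists with duplicate keys do not represent any Python input.
def Pre_listMinFunc (targetDict : List (String × Int)) : Prop :=
  targetDict ≠ [] ∧ (targetDict.map Prod.fst).Nodup
instance (targetDict : List (String × Int)) : Decidable (Pre_listMinFunc targetDict) := by
  unfold Pre_listMinFunc; infer_instance

def pvWitness_listMinFunc : (List (String × Int)) := [("a", 1), ("b", 0)]

def Spec_listMinFunc (targetDict : List (String × Int)) (out : List (String × Int)) : Prop := out = listMinFunc_alt targetDict
instance (targetDict : List (String × Int)) (out : List (String × Int)) : Decidable (Spec_listMinFunc targetDict out) := by unfold Spec_listMinFunc; infer_instance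

-- ===== CLAIM (what is proved, stated in full; the proofs are below) =====
def Claim_equal_listMinFunc : Prop := ∀ (targetDict : List (String × Int)), Dom_listMinFunc targetDict → Pre_listMinFunc targetDict → Spec_listMinFunc targetDict (listMinFunc targetDict)

-- ===== LEMMAS AND PROOFS =====

-- first-match lookup of a present key hits its own value when the keys are distinct
lemma lookup_of_nodup : ∀ (d : List (String × Int)), (d.map Prod.fst).Nodup →
    ∀ kv ∈ d, List.lookup kv.1 d = some kv.2 := by
  intro d
  induction d with
  | nil => intro _ kv h; cases h
  | cons p rest ih =>
    intro hnd kv hmem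
    simp only [List.map_cons, List.nodup_cons] at hnd
    rcases List.mem_cons.mp hmem with h | h
    · subst h; simp [List.lookup]
    · have hmem' : kv.1 ∈ rest.map Prod.fst := List.mem_map_of_mem (f := Prod.fst) h
      have hne : kv.1 ≠ p.1 := fun he => hnd.1 (he ▸ hmem')
      simp only [List.lookup, beq_eq_false_iff_ne.mpr hne]
      exact ih hnd.2 kv h

-- A's loop keeps a singleton dict as state: it is the map of a fold over pairs
lemma fold_singleton (d : List (String × Int)) : ∀ (ks : List String) (b : String × Int),
    ks.foldl (pvStep d) [b]
    = [ks.foldl (fun b k => if pvLookup d k < b.2 then (k, pvLookup d k) else b) b] := by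
  intro ks
  induction ks with
  | nil => intro b; rfl
  | cons k ks ih =>
    intro b
    simp only [List.foldl_cons, pvStep]
    by_cases h : pvLookup d k < b.2 <;> simp [h, ih]

-- when lookups agree with the stored values, the fold over keys is the fold over pairs
lemma fold_keys (g : String → Int) : ∀ (t : List (String × Int)) (b : String × Int),
    (∀ kv ∈ t, g kv.1 = kv.2) →
    (t.map Prod.fst).foldl (fun b k => if g k < b.2 then (k, g k) else b) b
    = t.foldl (fun b kv => if kv.2 < b.2 then kv else b) b := by
  intro t
  induction t with
  | nil => intro b _; rfl
  | cons p rest ih =>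
    intro b hg
    have hp : g p.1 = p.2 := hg p (by simp)
    simp only [List.map_cons, List.foldl_cons, hp]
    by_cases h : p.2 < b.2 <;>
      simp [h, ih _ (fun kv hkv => hg kv (by simp [hkv]))]

-- the head of the stable insertion sort is the running first-minimum
lemma head?_foldl_insertBy :
    ∀ (xs : List (String × Int)) (h : String × Int) (t : List (String × Int)),
      (xs.foldl (fun acc x => PySem.List.insertBy (fun a b => decide (a.2 < b.2)) x acc) (h :: t)).head?
      = some (xs.foldl (fun b x => if x.2 < b.2 then x else b) h) := by
  intro xs
  induction xs with
  | nil => intro h t; rfl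
  | cons x xs ih =>
    intro h t
    simp only [List.foldl_cons, PySem.List.insertBy]
    by_cases hb : x.2 < h.2
    · simp only [hb, decide_true, if_true]
      exact ih x (h :: t)
    · simp only [hb, decide_false, if_false]
      exact ih h (PySem.List.insertBy _ x t)

-- ===== VERDICT (by name: the statement is the Claim_ definition above) =====
theorem listMinFunc_spec : Claim_equal_listMinFunc := by
  intro targetDict _hdom hpre
  obtain ⟨hne, hnd⟩ := hpre
  obtain ⟨p, ds, rfl⟩ : ∃ p ds, targetDict = p :: ds := by
    cases targetDict with
    | nil => exact absurd rfl hne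
    | cons p ds => exact ⟨p, ds, rfl⟩
  unfold Spec_listMinFunc
  -- the value both sides compute: the first pair with minimal value
  have hg : ∀ kv ∈ p :: ds, pvLookup (p :: ds) kv.1 = kv.2 := by
    intro kv hkv
    simp [pvLookup, lookup_of_nodup _ hnd kv hkv]
  have hgp : pvLookup (p :: ds) p.1 = p.2 := hg p (by simp)
  -- A's side
  have hA : listMinFunc (p :: ds)
      = [ds.foldl (fun b kv => if kv.2 < b.2 then kv else b) p] := by
    show (match PySem.List.pyGet? ((p :: ds).map Prod.fst) 0 with
      | none => []
      | some firstKey =>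
        let minItem : List (String × Int) := [(firstKey, pvLookup (p :: ds) firstKey)]
        ((p :: ds).map Prod.fst).foldl (pvStep (p :: ds)) minItem) = _
    simp only [List.map_cons, PySem.List.pyGet?_zero_cons]
    simp only [List.foldl_cons, pvStep, hgp, lt_irrefl, if_false]
    rw [fold_singleton (p :: ds) (ds.map Prod.fst) (p.1, p.2)]
    rw [fold_keys (pvLookup (p :: ds)) ds p
      (fun kv hkv => hg kv (by simp [hkv]))]
  -- B's side
  have hB : (PySem.List.sorted (p :: ds) (fun kv => kv.2) false).head?
      = some (ds.foldl (fun b kv => if kv.2 < b.2 then kv else b) p) := by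
    rw [PySem.List.sorted_eq_foldl_insertBy]
    simp only [List.foldl_cons, PySem.List.insertBy]
    exact head?_foldl_insertBy ds p []
  rw [hA]
  unfold listMinFunc_alt
  cases hs : PySem.List.sorted (p :: ds) (fun kv => kv.2) false with
  | nil => exact absurd ((PySem.List.sorted_eq_nil_iff _ _ _).mp hs) (by simp)
  | cons m rest =>
    rw [hs] at hB
    simp only [List.head?_cons, Option.some.injEq] at hB
    rw [hB]
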